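-- pv_equiv track=rewrite | github.com/chaeonee/Programmers | level4/호텔방배정.py | solution
-- ===== SOURCE A (Python) =====
-- def Find(a, parent):
--     c_list = [a]
--     while a in parent.keys():
--         a = parent[a]
--         c_list.append(a)
--     return a, c_list
--
-- def solution(k, room_number):
--     room_info = {}
--
--     answer = []
--     for room in room_number:
--         room -= 1
--         room, c_list = Find(room,room_info)
--         answer.append(room+1)
--
--         next_room, _ = Find(room+1,room_info)
--         for c in c_list:
--             room_info[c] = next_room
--
--     return answer
-- ===== SOURCE B (Python) =====
-- def solution(k, room_number):
--     occupied = set()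
--     answer = []
--     for room in room_number:
--         while room in occupied:
--             room += 1
--         occupied.add(room)
--         answer.append(room)
--     return answer
-- ===== Notes on version B (the rewrite author's own statement) =====
-- stated objective: simpler
-- what changed: Replaced the union-find parent dictionary with path updates (and its 0-index shift) by a plain occupied-set with a linear probe to the next free room, working directly on the 1-indexed room numbers.
import Mathlib
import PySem

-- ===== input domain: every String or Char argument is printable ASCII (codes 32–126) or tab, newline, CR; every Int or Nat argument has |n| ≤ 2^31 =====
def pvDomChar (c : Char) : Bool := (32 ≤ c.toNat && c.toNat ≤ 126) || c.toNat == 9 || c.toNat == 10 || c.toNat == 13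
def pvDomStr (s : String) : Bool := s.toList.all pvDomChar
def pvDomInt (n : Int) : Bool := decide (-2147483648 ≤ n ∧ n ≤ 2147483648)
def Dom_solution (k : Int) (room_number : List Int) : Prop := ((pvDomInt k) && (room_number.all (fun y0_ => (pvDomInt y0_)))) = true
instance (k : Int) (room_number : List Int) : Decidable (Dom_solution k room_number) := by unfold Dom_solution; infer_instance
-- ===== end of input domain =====

-- B replaces A's union-find parent dictionary (with its ±1 index shifts) by a plain
-- occupied-set with a linear probe to the next free room; same return value, simpler code.

-- ===== PORT A =====
-- Find(a, parent): follows the parent chain, collecting it in c_list.  The Python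
-- 'while' is given fuel (one more than the dict size suffices, since chain keys are
-- distinct); this is only a totality guard, the computation is the same.
def pyFind (fuel : Nat) (a : Int) (parent : PySem.Dict Int Int) (cs : List Int) :
    Int × List Int :=
  match fuel with
  | 0 => (a, cs)
  | fuel + 1 =>
    match parent.get? a with
    | none => (a, cs)
    | some b => pyFind fuel b parent (cs ++ [b])

def solution (k : Int) (room_number : List Int) : List Int :=
  (room_number.foldl
    (fun (st : PySem.Dict Int Int × List Int) room =>
      let info := st.1
      let room0 := room - 1
      let fr := pyFind (info.items.length + 1) room0 info [room0]
      let root := fr.1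
      let c_list := fr.2
      let answer := st.2 ++ [root + 1]
      let next_room := (pyFind (info.items.length + 1) (root + 1) info [root + 1]).1
      let info' := c_list.foldl (fun d c => d.insert c next_room) info
      (info', answer))
    (PySem.Dict.empty, [])).2

-- ===== PORT B =====
-- helper lemma the termination argument of 'probe' cites
theorem pvFilterGeLen (l : List Int) (a b : Int) (hab : a < b) (ha : a ∈ l) :
    (l.filter (fun x => decide (b ≤ x))).length <
      (l.filter (fun x => decide (a ≤ x))).length := by
  induction l with
  | nil => cases ha
  | cons y ys ih =>
    have hmono : (ys.filter (fun x => decide (b ≤ x))).length ≤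
        (ys.filter (fun x => decide (a ≤ x))).length := by
      simp only [← List.countP_eq_length_filter]
      exact List.countP_mono_left (by intro z _ hz; simp at hz ⊢; omega)
    simp only [List.filter_cons]
    rcases List.mem_cons.mp ha with h | h
    · subst h
      have h1 : (decide (b ≤ a)) = false := by simp; omega
      have h2 : (decide (a ≤ a)) = true := by simp
      rw [h1, h2]
      simp only [Bool.false_eq_true, if_false, if_true, List.length_cons]
      omega
    · have hlt := ih h
      by_cases hb : b ≤ y
      · have hay : a ≤ y := le_of_lt (lt_of_lt_of_le hab hb)
        simp [hb, hay]; omega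
      · by_cases hay : a ≤ y
        · simp [hb, hay]; omega
        · simp [hb, hay]; omega

-- while room in occupied: room += 1
def probe (occ : PySem.Set Int) (room : Int) : Int :=
  if h : room ∈ occ then probe occ (room + 1) else room
termination_by (occ.filter (fun x => decide (room ≤ x))).length
decreasing_by
  exact pvFilterGeLen occ room (room + 1) (by omega) h

def solution_alt (k : Int) (room_number : List Int) : List Int :=
  (room_number.foldl
    (fun (st : PySem.Set Int × List Int) room =>
      let r := probe st.1 room
      (PySem.Set.add st.1 r, st.2 ++ [r]))
    (PySem.Set.empty, [])).2

-- ===== PRECONDITION & SPEC =====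
def Spec_solution (k : Int) (room_number : List Int) (out : List Int) : Prop := out = solution_alt k room_number
instance (k : Int) (room_number : List Int) (out : List Int) : Decidable (Spec_solution k room_number out) := by unfold Spec_solution; infer_instance

-- ===== CLAIM (what is proved, stated in full; the proofs are below) =====
def Claim_equal_solution : Prop := ∀ (k : Int) (room_number : List Int), Dom_solution k room_number → Spec_solution k room_number (solution k room_number)

-- ===== LEMMAS AND PROOFS =====

-- invariant on A's parent dictionary: values jump strictly up, skipping only keys
def InvA (info : PySem.Dict Int Int) : Prop :=
  info.keys.Nodup ∧
  ∀ c v, info.get? c = some v →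
    c < v ∧ ∀ x, c < x → x < v → info.contains x = true

-- relation between A's dictionary and B's occupied set (shifted by the ±1 indexing)
def RelAB (info : PySem.Dict Int Int) (occ : PySem.Set Int) : Prop :=
  InvA info ∧ ∀ x : Int, info.contains x = true ↔ (x + 1) ∈ occ

theorem probe_spec (occ : PySem.Set Int) (room : Int) :
    probe occ room ∉ occ ∧ room ≤ probe occ room ∧
      ∀ x, room ≤ x → x < probe occ room → x ∈ occ := by
  fun_induction probe occ room with
  | case1 room h ih =>
    refine ⟨ih.1, by omega, ?_⟩
    intro x hx1 hx2
    by_cases hx : x = room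
    · exact hx ▸ h
    · exact ih.2.2 x (by omega) hx2
  | case2 room h =>
    exact ⟨h, le_refl _, by intro x h1 h2; omega⟩

theorem probe_unique (occ : PySem.Set Int) (room r : Int)
    (h1 : r ∉ occ) (h2 : room ≤ r) (h3 : ∀ x, room ≤ x → x < r → x ∈ occ) :
    probe occ room = r := by
  obtain ⟨p1, p2, p3⟩ := probe_spec occ room
  by_cases h : probe occ room < r
  · exact absurd (h3 _ p2 h) p1
  · by_cases h' : r < probe occ room
    · exact absurd (p3 r h2 h') h1
    · omega

-- accumulator lemma: pyFind only appends to cs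
theorem pyFind_acc (fuel : Nat) (info : PySem.Dict Int Int) :
    ∀ a cs, pyFind fuel a info cs =
      ((pyFind fuel a info []).1, cs ++ (pyFind fuel a info []).2) := by
  induction fuel with
  | zero => intro a cs; simp [pyFind]
  | succ n ih =>
    intro a cs
    cases hg : info.get? a with
    | none => simp [pyFind, hg]
    | some b =>
      simp only [pyFind, hg]
      rw [ih b (cs ++ [b]), ih b ([] ++ [b])]
      simp

theorem pyFind_correct (info : PySem.Dict Int Int) (hinv : InvA info) :
    ∀ (fuel : Nat) (a : Int),
      (info.keys.filter (fun x => decide (a ≤ x))).length < fuel →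
      info.contains (pyFind fuel a info []).1 = false ∧
      (pyFind fuel a info []).1 ∈ a :: (pyFind fuel a info []).2 ∧
      ∀ c ∈ a :: (pyFind fuel a info []).2,
        c ≤ (pyFind fuel a info []).1 ∧
        ∀ x, c ≤ x → x < (pyFind fuel a info []).1 → info.contains x = true := by
  intro fuel
  induction fuel with
  | zero => intro a h; omega
  | succ n ih =>
    intro a hfuel
    cases hg : info.get? a with
    | none =>
      have hca : info.contains a = false := by
        rw [PySem.Dict.contains_eq_isSome_get?, hg]; rfl
      simp only [pyFind, hg]
      refine ⟨hca, by simp, ?_⟩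
      intro c hc
      simp at hc
      subst hc
      exact ⟨le_refl _, by intro x h1 h2; omega⟩
    | some b =>
      have hab : a < b ∧ ∀ x, a < x → x < b → info.contains x = true :=
        hinv.2 a b hg
      have hamem : a ∈ info.keys := by
        rw [← PySem.Dict.contains_iff_mem_keys,
          PySem.Dict.contains_eq_isSome_get?, hg]; rfl
      have hfuel' : (info.keys.filter (fun x => decide (b ≤ x))).length < n := by
        have := pvFilterGeLen info.keys a b hab.1 hamem
        omega
      have hca : info.contains a = true := by
        rw [PySem.Dict.contains_eq_isSome_get?, hg]; rfl
      obtain ⟨h1, h2, h3⟩ := ih b hfuel'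
      simp only [pyFind, hg, List.nil_append]
      rw [pyFind_acc n info b [b]]
      refine ⟨h1, ?_, ?_⟩
      · rcases List.mem_cons.mp h2 with h | h
        · rw [h]; simp
        · simp [h]
      · intro c hc
        rcases List.mem_cons.mp hc with h | h
        · -- c = a
          subst h
          obtain ⟨hb1, hb2⟩ := h3 b (by simp)
          refine ⟨by omega, ?_⟩
          intro x hx1 hx2
          by_cases hxa : x = c
          · exact hxa ▸ hca
          · by_cases hxb : x < b
            · exact hab.2 x (by omega) hxb
            · exact hb2 x (by omega) hx2
        · exact h3 c (by simpa using h)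

-- get? after a constant-value insert loop
theorem get?_foldl_insert_const (cs : List Int) (v : Int) :
    ∀ (d : PySem.Dict Int Int) (x : Int),
      (cs.foldl (fun d c => d.insert c v) d).get? x =
        if x ∈ cs then some v else d.get? x := by
  induction cs with
  | nil => intro d x; simp
  | cons c cs ih =>
    intro d x
    simp only [List.foldl_cons, ih]
    by_cases hx : x ∈ cs
    · simp [hx]
    · by_cases hxc : x = c
      · subst hxc
        simp [hx, PySem.Dict.get?_insert_self]
      · simp [hx, hxc, PySem.Dict.get?_insert]

theorem contains_foldl_insert_const (cs : List Int) (v : Int)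
    (d : PySem.Dict Int Int) (x : Int) :
    (cs.foldl (fun d c => d.insert c v) d).contains x =
      (decide (x ∈ cs) || d.contains x) := by
  rw [PySem.Dict.contains_eq_isSome_get?, get?_foldl_insert_const,
    PySem.Dict.contains_eq_isSome_get?]
  by_cases hx : x ∈ cs <;> simp [hx]

-- one loop iteration preserves RelAB and appends equal answers
theorem step_preserves (info : PySem.Dict Int Int) (occ : PySem.Set Int)
    (hrel : RelAB info occ) (room : Int) :
    (pyFind (info.items.length + 1) (room - 1) info [room - 1]).1 + 1 =
      probe occ room ∧
    RelAB ((pyFind (info.items.length + 1) (room - 1) info [room - 1]).2.foldl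
          (fun d c => d.insert c
            ((pyFind (info.items.length + 1)
              ((pyFind (info.items.length + 1) (room - 1) info [room - 1]).1 + 1)
              info
              [(pyFind (info.items.length + 1) (room - 1) info [room - 1]).1 + 1]).1))
          info)
        (PySem.Set.add occ (probe occ room)) := by
  obtain ⟨hinv, hocc⟩ := hrel
  have hkeyslen : info.keys.length = info.items.length := by
    simp [PySem.Dict.keys]
  have hfuel : ∀ a : Int,
      (info.keys.filter (fun x => decide (a ≤ x))).length < info.items.length + 1 := by
    intro a
    have := List.length_filter_le (fun x => decide (a ≤ x)) info.keys
    omega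
  -- first Find
  rw [pyFind_acc (info.items.length + 1) info (room - 1) [room - 1]]
  dsimp only
  simp only [List.cons_append, List.nil_append]
  obtain ⟨hf1, hf2, hf3⟩ := pyFind_correct info hinv (info.items.length + 1)
    (room - 1) (hfuel _)
  set f := (pyFind (info.items.length + 1) (room - 1) info []).1 with hfdef
  set tl := (pyFind (info.items.length + 1) (room - 1) info []).2 with htldef
  -- B's probe returns f + 1
  have hprobe : probe occ room = f + 1 := by
    apply probe_unique
    · intro hmem
      have := (hocc f).mpr hmem
      rw [hf1] at this; exact absurd this (by simp)
    · have := (hf3 (room - 1) (by simp)).1; omega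
    · intro x hx1 hx2
      have : info.contains (x - 1) = true :=
        (hf3 (room - 1) (by simp)).2 (x - 1) (by omega) (by omega)
      have := (hocc (x - 1)).mp this
      simpa using this
  -- second Find
  rw [pyFind_acc (info.items.length + 1) info (f + 1) [f + 1]]
  dsimp only
  obtain ⟨hn1, hn2, hn3⟩ := pyFind_correct info hinv (info.items.length + 1)
    (f + 1) (hfuel _)
  set nf := (pyFind (info.items.length + 1) (f + 1) info []).1 with hnfdef
  have hnf : f + 1 ≤ nf ∧ ∀ x, f + 1 ≤ x → x < nf → info.contains x = true :=
    hn3 (f + 1) (by simp)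
  -- the updated dictionary
  set clist := (room - 1) :: tl with hcl
  have hf2' : f ∈ clist := hf2
  have hf3' : ∀ c ∈ clist, c ≤ f ∧ ∀ x, c ≤ x → x < f → info.contains x = true := hf3
  have hcontains' : ∀ x, (clist.foldl (fun d c => d.insert c nf) info).contains x =
      (decide (x ∈ clist) || info.contains x) := by
    intro x; rw [contains_foldl_insert_const]
  have hcontains'' : ∀ x, (clist.foldl (fun d c => d.insert c nf) info).contains x = true ↔
      (x = f ∨ info.contains x = true) := by
    intro x
    rw [hcontains' x]
    constructor
    · intro h
      rcases Bool.or_eq_true_iff.mp h with h | h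
      · have hx : x ∈ clist := by simpa using h
        obtain ⟨hc1, hc2⟩ := hf3' x hx
        by_cases hxf : x = f
        · exact Or.inl hxf
        · exact Or.inr (hc2 x (le_refl _) (by omega))
      · exact Or.inr h
    · intro h
      rcases h with h | h
      · subst h
        simp [hf2']
      · simp [h]
  refine ⟨hprobe.symm, ?_, ?_⟩
  · -- InvA of the updated dictionary
    constructor
    · exact PySem.Dict.nodup_keys_foldl_insert clist (fun _ _ => nf) info hinv.1
    · intro c v hget
      rw [get?_foldl_insert_const] at hget
      by_cases hc : c ∈ clist
      · rw [if_pos hc] at hget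
        have hv : v = nf := by injection hget; omega
        subst hv
        obtain ⟨hc1, hc2⟩ := hf3' c hc
        refine ⟨by omega, ?_⟩
        intro x hx1 hx2
        rw [hcontains'' x]
        by_cases hxf : x = f
        · exact Or.inl hxf
        · by_cases hxlt : x < f
          · exact Or.inr (hc2 x (by omega) hxlt)
          · exact Or.inr (hnf.2 x (by omega) hx2)
      · rw [if_neg hc] at hget
        obtain ⟨h1, h2⟩ := hinv.2 c v hget
        refine ⟨h1, ?_⟩
        intro x hx1 hx2
        rw [hcontains'' x]
        exact Or.inr (h2 x hx1 hx2)
  · -- occupied correspondence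
    intro x
    rw [hcontains'' x, hprobe, PySem.Set.mem_add]
    constructor
    · intro h
      rcases h with h | h
      · exact Or.inr (by omega)
      · exact Or.inl ((hocc x).mp h)
    · intro h
      rcases h with h | h
      · exact Or.inr ((hocc x).mpr h)
      · exact Or.inl (by omega)

theorem foldl_agree (rooms : List Int) :
    ∀ (info : PySem.Dict Int Int) (occ : PySem.Set Int) (ans : List Int),
      RelAB info occ →
      (rooms.foldl
        (fun (st : PySem.Dict Int Int × List Int) room =>
          let info := st.1
          let room0 := room - 1
          let fr := pyFind (info.items.length + 1) room0 info [room0]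
          let root := fr.1
          let c_list := fr.2
          let answer := st.2 ++ [root + 1]
          let next_room :=
            (pyFind (info.items.length + 1) (root + 1) info [root + 1]).1
          let info' := c_list.foldl (fun d c => d.insert c next_room) info
          (info', answer))
        (info, ans)).2 =
      (rooms.foldl
        (fun (st : PySem.Set Int × List Int) room =>
          let r := probe st.1 room
          (PySem.Set.add st.1 r, st.2 ++ [r]))
        (occ, ans)).2 := by
  induction rooms with
  | nil => intro info occ ans _; rfl
  | cons room rooms ih =>
    intro info occ ans hrel
    obtain ⟨heq, hrel'⟩ := step_preserves info occ hrel room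
    simp only [List.foldl_cons]
    rw [ih _ _ _ hrel', heq]

theorem rel_empty : RelAB PySem.Dict.empty PySem.Set.empty := by
  refine ⟨⟨by simp [PySem.Dict.keys_empty], ?_⟩, ?_⟩
  · intro c v h
    rw [PySem.Dict.get?_empty] at h
    exact absurd h (by simp)
  · intro x
    simp [PySem.Dict.contains_empty, PySem.Set.empty]

-- ===== VERDICT (by name: the statement is the Claim_ definition above) =====
theorem solution_spec : Claim_equal_solution := by
  intro k room_number _
  unfold Spec_solution solution solution_alt
  exact foldl_agree room_number PySem.Dict.empty PySem.Set.empty [] rel_empty
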